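-- pv_equiv track=rewrite | github.com/spoiboi/UML-Analyzer | pythonProject/validate_design.py | _get_uml_bounds
-- ===== SOURCE A (Python) =====
-- def _get_uml_bounds(lines):
--     start_idx = 0
--     end_idx = len(lines)
--
--     for i, line in enumerate(lines):
--         if line.lower() == "@startuml":
--             start_idx = i + 1
--             break
--
--     for i in range(len(lines) - 1, -1, -1):
--         if lines[i].lower() == "@enduml":
--             end_idx = i
--             break
--
--     return start_idx, end_idx
-- ===== SOURCE B (Python) =====
-- def _get_uml_bounds(lines):
--     start = None
--     end = None
--     for i in range(len(lines) - 1, -1, -1):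
--         low = lines[i].lower()
--         if low == "@startuml":
--             start = i + 1
--         if end is None and low == "@enduml":
--             end = i
--     return (start if start is not None else 0, end if end is not None else len(lines))
-- ===== Notes on version B (the rewrite author's own statement) =====
-- stated objective: alternative
-- what changed: Replaced A's forward break-on-first-match loop plus separate backward break-on-first-match loop by one backward pass with two optional accumulators: start is overwritten on every '@startuml' (so the first match wins), end is set once when still unset (so the last '@enduml' wins), with defaults applied at the end.
import Mathlib
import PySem

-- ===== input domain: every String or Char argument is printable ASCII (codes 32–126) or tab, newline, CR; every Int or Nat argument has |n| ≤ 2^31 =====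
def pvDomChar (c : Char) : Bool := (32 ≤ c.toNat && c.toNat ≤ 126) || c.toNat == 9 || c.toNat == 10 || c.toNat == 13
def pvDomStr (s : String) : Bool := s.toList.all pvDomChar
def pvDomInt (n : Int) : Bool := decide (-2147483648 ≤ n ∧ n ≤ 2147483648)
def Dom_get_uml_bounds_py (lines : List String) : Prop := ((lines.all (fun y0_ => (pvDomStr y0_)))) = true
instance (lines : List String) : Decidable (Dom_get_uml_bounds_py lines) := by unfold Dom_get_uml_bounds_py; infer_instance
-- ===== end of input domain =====

-- B replaces A's two break-on-first-match loops by ONE backward pass with two optional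
-- accumulators: start is overwritten on every match (so the first match wins at the end),
-- end is set once when still unset (so the last match wins). Objective: alternative.

-- ===== PORT A =====
-- first loop: 'for i, line in enumerate(lines): if line.lower() == "@startuml": start_idx = i+1; break'
def pvAStart : List (Int × String) → Int
  | [] => 0
  | (i, line) :: rest =>
      if PySem.Str.lower line = "@startuml" then i + 1 else pvAStart rest

-- second loop: 'for i in range(len(lines)-1, -1, -1): if lines[i].lower() == "@enduml": end_idx = i; break'
-- (dflt is the initial end_idx = len(lines); indices produced by the range are always in bounds)
def pvAEnd (lines : List String) (dflt : Int) : List Int → Int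
  | [] => dflt
  | i :: rest =>
      if PySem.Str.lower (PySem.List.pyGetD lines i "") = "@enduml" then i
      else pvAEnd lines dflt rest

def get_uml_bounds_py (lines : List String) : Int × Int :=
  (pvAStart (PySem.List.enumerate lines 0),
   pvAEnd lines (lines.length : Int)
     (PySem.List.pyRange ((lines.length : Int) - 1) (-1) (-1)))

-- ===== PORT B =====
-- loop body of Source B's single backward pass; state = (start, end) as Python's (None|int, None|int)
def pvBStep (lines : List String) (st : Option Int × Option Int) (i : Int) :
    Option Int × Option Int :=
  let low := PySem.Str.lower (PySem.List.pyGetD lines i "")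
  let s := if low = "@startuml" then some (i + 1) else st.1
  let e := if st.2 = none ∧ low = "@enduml" then some i else st.2
  (s, e)

def get_uml_bounds_py_alt (lines : List String) : Int × Int :=
  let st := (PySem.List.pyRange ((lines.length : Int) - 1) (-1) (-1)).foldl
      (pvBStep lines) (none, none)
  (st.1.getD 0, st.2.getD (lines.length : Int))

-- ===== PRECONDITION & SPEC =====
def Spec_get_uml_bounds_py (lines : List String) (out : Int × Int) : Prop := out = get_uml_bounds_py_alt lines
instance (lines : List String) (out : Int × Int) : Decidable (Spec_get_uml_bounds_py lines out) := by unfold Spec_get_uml_bounds_py; infer_instance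

-- ===== CLAIM (what is proved, stated in full; the proofs are below) =====
def Claim_equal_get_uml_bounds_py : Prop := ∀ (lines : List String), Dom_get_uml_bounds_py lines → Spec_get_uml_bounds_py lines (get_uml_bounds_py lines)

-- ===== LEMMAS AND PROOFS =====

-- the index list of lines (lowered) equal to m
def pvHits (m : String) (xs : List String) : List Int :=
  (PySem.List.enumerate (xs.map PySem.Str.lower) 0).filterMap
    (fun p => if p.2 = m then some p.1 else none)

theorem pvStart_eq (xs : List String) : ∀ (s : Int),
    pvAStart (PySem.List.enumerate xs s) =
    (match (PySem.List.enumerate (xs.map PySem.Str.lower) s).filterMap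
        (fun p => if p.2 = "@startuml" then some p.1 else none) with
      | [] => 0 | i :: _ => i + 1) := by
  induction xs with
  | nil => intro s; simp [PySem.List.enumerate_nil, pvAStart]
  | cons x xs ih =>
      intro s
      simp only [List.map_cons, PySem.List.enumerate_cons, pvAStart, List.filterMap_cons]
      by_cases h : PySem.Str.lower x = "@startuml" <;> simp [h, ih]

-- scanning an index list all of whose entries address the ys-prefix ignores the appended element
theorem pvAEnd_congr_prefix (ys : List String) (x : String) (d : Int) :
    ∀ (idxs : List Int), (∀ i ∈ idxs, 0 ≤ i ∧ i < (ys.length : Int)) →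
    pvAEnd (ys ++ [x]) d idxs = pvAEnd ys d idxs := by
  intro idxs
  induction idxs with
  | nil => intro _; rfl
  | cons i rest ih =>
      intro h
      have hi := h i (by simp)
      have hget : PySem.List.pyGetD (ys ++ [x]) i "" = PySem.List.pyGetD ys i "" := by
        rw [PySem.List.pyGetD_eq_getElem (ys ++ [x]) "" hi.1 (by simp; omega),
            PySem.List.pyGetD_eq_getElem ys "" hi.1 (by omega)]
        rw [List.getElem_append_left (by omega)]
      simp only [pvAEnd, hget]
      split
      · rfl
      · exact ih (fun j hj => h j (by simp [hj]))

theorem pvEnd_eq (xs : List String) : ∀ (d : Int),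
    pvAEnd xs d ((PySem.List.pyRange 0 (xs.length : Int) 1).reverse) =
    ((pvHits "@enduml" xs).getLast?).getD d := by
  induction xs using List.reverseRecOn with
  | nil => intro d; simp [PySem.List.pyRange_one_eq_nil, PySem.List.enumerate_nil, pvAEnd, pvHits]
  | append_singleton ys x ih =>
      intro d
      have hlen : ((ys ++ [x]).length : Int) = (ys.length : Int) + 1 := by simp
      rw [hlen, PySem.List.pyRange_one_succ_right (by omega)]
      simp only [List.reverse_append, List.reverse_cons, List.reverse_nil, List.nil_append,
        List.cons_append, List.nil_append]
      have hget : PySem.List.pyGetD (ys ++ [x]) (ys.length : Int) "" = x := by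
        rw [PySem.List.pyGetD_eq_getElem (ys ++ [x]) "" (by omega) (by simp)]
        simp
      simp only [pvAEnd, hget]
      have henum : pvHits "@enduml" (ys ++ [x]) =
          pvHits "@enduml" ys ++
            (if PySem.Str.lower x = "@enduml" then [((ys.length : Int))] else []) := by
        simp only [pvHits, List.map_append, List.map_cons, List.map_nil,
          PySem.List.enumerate_append, List.filterMap_append, List.length_map,
          PySem.List.enumerate_cons, PySem.List.enumerate_nil, List.filterMap_cons,
          List.filterMap_nil]
        by_cases hx : PySem.Str.lower x = "@enduml" <;> simp [hx]
      rw [henum]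
      by_cases h : PySem.Str.lower x = "@enduml"
      · simp [h]
      · simp only [h, if_false, List.append_nil]
        rw [pvAEnd_congr_prefix ys x d _ (by
          intro i hi
          rw [List.mem_reverse, PySem.List.mem_pyRange_one] at hi
          exact ⟨hi.1, hi.2⟩)]
        exact ih d

-- B's backward fold, characterised against the hit lists, for ANY initial state
theorem pvB_fold (xs : List String) : ∀ (st : Option Int × Option Int),
    ((PySem.List.pyRange 0 (xs.length : Int) 1).reverse).foldl (pvBStep xs) st =
    (Option.or ((pvHits "@startuml" xs).head?.map (· + 1)) st.1,
     Option.or st.2 ((pvHits "@enduml" xs).getLast?)) := by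
  induction xs using List.reverseRecOn with
  | nil =>
      intro st
      simp [PySem.List.pyRange_one_eq_nil, PySem.List.enumerate_nil, pvHits,
        Option.or_none, Option.none_or]
  | append_singleton ys x ih =>
      intro st
      have hlen : ((ys ++ [x]).length : Int) = (ys.length : Int) + 1 := by simp
      rw [hlen, PySem.List.pyRange_one_succ_right (by omega)]
      simp only [List.reverse_append, List.reverse_cons, List.reverse_nil, List.nil_append,
        List.cons_append, List.nil_append, List.foldl_cons]
      have hget : PySem.List.pyGetD (ys ++ [x]) (ys.length : Int) "" = x := by
        rw [PySem.List.pyGetD_eq_getElem (ys ++ [x]) "" (by omega) (by simp)]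
        simp
      have hcongr : ((PySem.List.pyRange 0 ((ys.length : Int)) 1).reverse).foldl
          (pvBStep (ys ++ [x])) (pvBStep (ys ++ [x]) st (ys.length : Int)) =
          ((PySem.List.pyRange 0 ((ys.length : Int)) 1).reverse).foldl
          (pvBStep ys) (pvBStep (ys ++ [x]) st (ys.length : Int)) := by
        apply PySem.List.foldl_congr_mem
        intro acc i hi
        rw [List.mem_reverse, PySem.List.mem_pyRange_one] at hi
        have hg : PySem.List.pyGetD (ys ++ [x]) i "" = PySem.List.pyGetD ys i "" := by
          rw [PySem.List.pyGetD_eq_getElem (ys ++ [x]) "" hi.1 (by simp; omega),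
              PySem.List.pyGetD_eq_getElem ys "" hi.1 (by omega)]
          rw [List.getElem_append_left (by omega)]
        simp [pvBStep, hg]
      rw [hcongr, ih]
      have hs : pvHits "@startuml" (ys ++ [x]) =
          pvHits "@startuml" ys ++
            (if PySem.Str.lower x = "@startuml" then [((ys.length : Int))] else []) := by
        simp only [pvHits, List.map_append, List.map_cons, List.map_nil,
          PySem.List.enumerate_append, List.filterMap_append, List.length_map,
          PySem.List.enumerate_cons, PySem.List.enumerate_nil, List.filterMap_cons,
          List.filterMap_nil]
        by_cases hx : PySem.Str.lower x = "@startuml" <;> simp [hx]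
      have he : pvHits "@enduml" (ys ++ [x]) =
          pvHits "@enduml" ys ++
            (if PySem.Str.lower x = "@enduml" then [((ys.length : Int))] else []) := by
        simp only [pvHits, List.map_append, List.map_cons, List.map_nil,
          PySem.List.enumerate_append, List.filterMap_append, List.length_map,
          PySem.List.enumerate_cons, PySem.List.enumerate_nil, List.filterMap_cons,
          List.filterMap_nil]
        by_cases hx : PySem.Str.lower x = "@enduml" <;> simp [hx]
      rw [hs, he]
      simp only [pvBStep, hget, Prod.mk.injEq]
      constructor
      · by_cases hx : PySem.Str.lower x = "@startuml" <;>
          cases hh : (pvHits "@startuml" ys).head? <;>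
          simp [hx, Option.or, List.head?_append, hh]
      · by_cases hx : PySem.Str.lower x = "@enduml" <;>
          cases hst : st.2 <;>
          simp [hx, Option.or, List.getLast?_append]

-- ===== VERDICT (by name: the statement is the Claim_ definition above) =====
theorem get_uml_bounds_py_spec : Claim_equal_get_uml_bounds_py := by
  intro lines _
  unfold Spec_get_uml_bounds_py get_uml_bounds_py get_uml_bounds_py_alt
  have hrev : PySem.List.pyRange ((lines.length : Int) - 1) (-1) (-1) =
      (PySem.List.pyRange 0 (lines.length : Int) 1).reverse := by
    rw [PySem.List.pyRange_neg_one_eq_reverse]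
    norm_num
  rw [hrev, pvB_fold lines (none, none)]
  simp only [pvStart_eq lines 0, pvEnd_eq lines, pvHits, Option.or_none, Option.none_or]
  refine Prod.ext ?_ rfl
  · cases hh : (PySem.List.enumerate (lines.map PySem.Str.lower) 0).filterMap
        (fun p => if p.2 = "@startuml" then some p.1 else none) <;> simp
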